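-- pv_equiv track=rewrite | github.com/MrBrantCode/unitest_baseline | mut_generate/mist_train_cf/cf_16502/solution.py | fibonacci_odd
-- ===== SOURCE A (Python) =====
-- def fibonacci_odd(n):
--     def fibonacci(i):
--         if i <= 1:
--             return i
--         return fibonacci(i-1) + fibonacci(i-2)
--
--     result = []
--     for i in range(n+1):
--         fib = fibonacci(i)
--         if fib % 2 != 0:
--             result.append(fib)
--     return result
-- ===== SOURCE B (Python) =====
-- def fibonacci_odd(n):
--     result = []
--     a, b = 0, 1
--     for _ in range(n + 1):
--         if a % 2 != 0:
--             result.append(a)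
--         a, b = b, a + b
--     return result
-- ===== Notes on version B (the rewrite author's own statement) =====
-- stated objective: faster
-- what changed: Replaced the per-index naive exponential recursive Fibonacci with a single iterative pass that carries the (fib(i), fib(i+1)) pair, appending the odd values as it goes.
import Mathlib
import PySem

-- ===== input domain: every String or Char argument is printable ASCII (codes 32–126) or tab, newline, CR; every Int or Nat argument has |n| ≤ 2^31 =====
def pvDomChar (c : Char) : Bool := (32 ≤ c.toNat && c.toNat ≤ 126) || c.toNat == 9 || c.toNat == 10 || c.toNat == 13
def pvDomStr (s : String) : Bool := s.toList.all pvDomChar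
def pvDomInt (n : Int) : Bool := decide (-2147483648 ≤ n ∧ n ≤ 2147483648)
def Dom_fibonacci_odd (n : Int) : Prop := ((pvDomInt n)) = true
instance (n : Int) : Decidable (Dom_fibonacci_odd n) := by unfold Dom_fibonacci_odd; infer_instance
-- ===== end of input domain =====

-- B replaces A's naive exponential recursion per index by one iterative pass carrying
-- the current Fibonacci pair (objective: faster, asymptotic).

-- ===== PORT A =====
-- inner helper 'fibonacci': naive double recursion; called only with i ≥ 0, ported on Nat
def fibNaive : Nat → Int
  | 0 => 0
  | 1 => 1
  | (k+2) => fibNaive (k+1) + fibNaive k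

def fibonacci_odd (n : Int) : List Int :=
  (PySem.List.pyRange 0 (n+1) 1).foldl
    (fun result i =>
      let fib := fibNaive i.toNat
      if PySem.Int.mod fib 2 ≠ 0 then result ++ [fib] else result) []

-- ===== PORT B =====
-- the loop 'for _ in range(n+1)' with state (a, b, result)
def fibLoopB : Nat → Int → Int → List Int → List Int
  | 0, _, _, result => result
  | (m+1), a, b, result =>
      fibLoopB m b (a + b) (if PySem.Int.mod a 2 ≠ 0 then result ++ [a] else result)

def fibonacci_odd_alt (n : Int) : List Int :=
  fibLoopB (n + 1).toNat 0 1 []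

-- ===== PRECONDITION & SPEC =====
def Spec_fibonacci_odd (n : Int) (out : List Int) : Prop := out = fibonacci_odd_alt n
instance (n : Int) (out : List Int) : Decidable (Spec_fibonacci_odd n out) := by unfold Spec_fibonacci_odd; infer_instance

-- ===== CLAIM (what is proved, stated in full; the proofs are below) =====
def Claim_equal_fibonacci_odd : Prop := ∀ (n : Int), Dom_fibonacci_odd n → Spec_fibonacci_odd n (fibonacci_odd n)

-- ===== LEMMAS AND PROOFS =====

-- ===== VERDICT (by name: the statement is the Claim_ definition above) =====
-- common closed description: odd Fibonacci values among indices k..k+m-1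
def oddFibs : Nat → Nat → List Int
  | 0, _ => []
  | (m+1), k =>
      (if PySem.Int.mod (fibNaive k) 2 ≠ 0 then [fibNaive k] else []) ++ oddFibs m (k+1)

lemma fibLoopB_eq (m : Nat) : ∀ (k : Nat) (res : List Int),
    fibLoopB m (fibNaive k) (fibNaive (k+1)) res = res ++ oddFibs m k := by
  induction m with
  | zero => intro k res; simp [fibLoopB, oddFibs]
  | succ m ih =>
    intro k res
    have h2 : fibNaive k + fibNaive (k+1) = fibNaive ((k+1)+1) := by
      simp [fibNaive]; ring
    rw [show fibLoopB (m+1) (fibNaive k) (fibNaive (k+1)) res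
        = fibLoopB m (fibNaive (k+1)) (fibNaive k + fibNaive (k+1))
            (if PySem.Int.mod (fibNaive k) 2 ≠ 0 then res ++ [fibNaive k] else res) from rfl,
       h2, ih (k+1)]
    show _ = res ++ oddFibs (m+1) k
    rw [show oddFibs (m+1) k
        = (if PySem.Int.mod (fibNaive k) 2 ≠ 0 then [fibNaive k] else []) ++ oddFibs m (k+1)
        from rfl]
    split_ifs with h <;> simp

lemma oddFibs_succ_right (m : Nat) : ∀ (k : Nat),
    oddFibs (m+1) k
      = oddFibs m k ++ (if PySem.Int.mod (fibNaive (k+m)) 2 ≠ 0 then [fibNaive (k+m)] else []) := by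
  induction m with
  | zero => intro k; simp [oddFibs]
  | succ m ih =>
    intro k
    rw [show oddFibs (m+1+1) k
        = (if PySem.Int.mod (fibNaive k) 2 ≠ 0 then [fibNaive k] else []) ++ oddFibs (m+1) (k+1)
        from rfl, ih (k+1),
        show oddFibs (m+1) k
        = (if PySem.Int.mod (fibNaive k) 2 ≠ 0 then [fibNaive k] else []) ++ oddFibs m (k+1)
        from rfl,
        show k+1+m = k+(m+1) from by omega]
    simp

lemma foldlA_eq (m : Nat) : ∀ (acc : List Int),
    (List.range m).foldl
      (fun result j =>
        let fib := fibNaive j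
        if PySem.Int.mod fib 2 ≠ 0 then result ++ [fib] else result) acc
    = acc ++ oddFibs m 0 := by
  induction m with
  | zero => intro acc; simp [oddFibs]
  | succ m ih =>
    intro acc
    rw [List.range_succ, List.foldl_append, ih, oddFibs_succ_right]
    simp only [List.foldl_cons, List.foldl_nil, Nat.zero_add]
    split_ifs with h <;> simp

theorem fibonacci_odd_spec : Claim_equal_fibonacci_odd := by
  intro n _
  unfold Spec_fibonacci_odd fibonacci_odd fibonacci_odd_alt
  rw [PySem.List.pyRange_one]
  have hfold : ((List.range (n + 1 - 0).toNat).map (fun k : Nat => (0:Int) + k)).foldl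
      (fun result i =>
        let fib := fibNaive i.toNat
        if PySem.Int.mod fib 2 ≠ 0 then result ++ [fib] else result) []
      = (List.range (n + 1 - 0).toNat).foldl
      (fun result j =>
        let fib := fibNaive j
        if PySem.Int.mod fib 2 ≠ 0 then result ++ [fib] else result) [] := by
    rw [List.foldl_map]
    simp
  rw [hfold, foldlA_eq]
  have : (n + 1 - 0).toNat = (n + 1).toNat := by omega
  rw [this]
  have hb := fibLoopB_eq (n + 1).toNat 0 []
  rw [show fibNaive 0 = 0 from rfl, show fibNaive (0+1) = 1 from rfl] at hb
  rw [hb]
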